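-- pv_equiv track=rewrite | github.com/amane-uehara/fitbit-fetcher | parse_json_script/lib_parse_json.py | item_join
-- ===== SOURCE A (Python) =====
-- def hhmm_list(grad):
--   result = []
--
--   if grad == '1m':
--     for h in range(24):
--       for m in range(60):
--         result.append('%02d%02d' % (h,m))
--
--   elif grad == '15m':
--     for h in range(24):
--       for m15 in range(4):
--         result.append('%02d%02d' % (h,m15*15))
--
--   return result
--
-- def item_join(item_dict, grad):
--   result ={}
--   for hhmm in hhmm_list(grad):
--     tmp = {}
--     for key in item_dict.keys():
--       if hhmm in item_dict[key].keys():
--         tmp[key] = item_dict[key][hhmm]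
--       else:
--         tmp[key] = {}
--     result[hhmm] = tmp
--
--   return result
-- ===== SOURCE B (Python) =====
-- def hhmm_list(grad):
--   result = []
--
--   if grad == '1m':
--     for h in range(24):
--       for m in range(60):
--         result.append('%02d%02d' % (h,m))
--
--   elif grad == '15m':
--     for h in range(24):
--       for m15 in range(4):
--         result.append('%02d%02d' % (h,m15*15))
--
--   return result
--
-- def item_join(item_dict, grad):
--   # default-fill the whole grid, then scatter only the present entries
--   result = {}
--   for hhmm in hhmm_list(grad):
--     result[hhmm] = {key: {} for key in item_dict}
--   for key, sub in item_dict.items():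
--     for hhmm, val in sub.items():
--       if hhmm in result:
--         result[hhmm][key] = val
--   return result
-- ===== Notes on version B (the rewrite author's own statement) =====
-- stated objective: alternative
-- what changed: Instead of testing membership of hhmm in every per-key sub-dict for every grid slot, B first fills the whole grid with default empty cells and then does one sparse scatter pass over only the entries actually present in item_dict.
import Mathlib
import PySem

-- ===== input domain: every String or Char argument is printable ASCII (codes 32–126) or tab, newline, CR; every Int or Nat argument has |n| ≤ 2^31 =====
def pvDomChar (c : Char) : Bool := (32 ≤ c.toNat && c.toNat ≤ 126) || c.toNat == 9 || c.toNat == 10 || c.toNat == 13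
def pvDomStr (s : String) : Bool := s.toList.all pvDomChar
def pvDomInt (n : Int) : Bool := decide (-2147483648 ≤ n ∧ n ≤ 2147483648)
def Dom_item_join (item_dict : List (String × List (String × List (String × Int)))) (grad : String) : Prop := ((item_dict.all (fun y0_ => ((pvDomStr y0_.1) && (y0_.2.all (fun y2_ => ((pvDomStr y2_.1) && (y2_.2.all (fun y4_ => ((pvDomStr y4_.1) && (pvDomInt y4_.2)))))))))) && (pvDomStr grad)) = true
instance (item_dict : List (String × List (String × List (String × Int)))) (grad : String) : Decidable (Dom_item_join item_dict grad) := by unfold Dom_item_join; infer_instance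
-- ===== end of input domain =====

-- B replaces A's per-cell membership test by a default-filled grid plus one sparse
-- scatter pass over the entries actually present (objective: alternative decomposition).

-- ===== PORT A =====
-- shared helper, used verbatim by both Pythons ('%02d%02d' % (h, m) = str(h).zfill(2) + str(m).zfill(2) for 0 ≤ h, m < 100)
def hhmm_list (grad : String) : List String :=
  if grad == "1m" then
    (PySem.List.pyRange 0 24 1).foldl (fun result h =>
      (PySem.List.pyRange 0 60 1).foldl (fun result m =>
        result ++ [PySem.Str.zfill (PySem.Int.toStr h) 2 ++ PySem.Str.zfill (PySem.Int.toStr m) 2]) result) []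
  else if grad == "15m" then
    (PySem.List.pyRange 0 24 1).foldl (fun result h =>
      (PySem.List.pyRange 0 4 1).foldl (fun result m15 =>
        result ++ [PySem.Str.zfill (PySem.Int.toStr h) 2 ++ PySem.Str.zfill (PySem.Int.toStr (m15 * 15)) 2]) result) []
  else []

def item_join (item_dict : List (String × List (String × List (String × Int)))) (grad : String) : List (String × List (String × List (String × Int))) :=
  let d : PySem.Dict String (List (String × List (String × Int))) := PySem.Dict.mk item_dict
  let result : PySem.Dict String (PySem.Dict String (List (String × Int))) :=
    (hhmm_list grad).foldl (fun result hhmm =>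
      let tmp : PySem.Dict String (List (String × Int)) :=
        d.keys.foldl (fun tmp key =>
          let sub : PySem.Dict String (List (String × Int)) := PySem.Dict.mk (d.getD key [])
          if sub.contains hhmm then tmp.insert key (sub.getD hhmm [])
          else tmp.insert key []) PySem.Dict.empty
      result.insert hhmm tmp) PySem.Dict.empty
  result.items.map (fun p => (p.1, p.2.items))

-- ===== PORT B =====
def item_join_alt (item_dict : List (String × List (String × List (String × Int)))) (grad : String) : List (String × List (String × List (String × Int))) :=
  -- default-fill the whole grid …
  let base : PySem.Dict String (PySem.Dict String (List (String × Int))) :=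
    (hhmm_list grad).foldl (fun r hhmm =>
      r.insert hhmm ((PySem.Dict.mk item_dict).keys.foldl
        (fun t key => t.insert key ([] : List (String × Int))) PySem.Dict.empty)) PySem.Dict.empty
  -- … then scatter only the entries actually present
  let result : PySem.Dict String (PySem.Dict String (List (String × Int))) :=
    item_dict.foldl (fun r p =>
      p.2.foldl (fun r q =>
        if r.contains q.1 then r.insert q.1 ((r.getD q.1 PySem.Dict.empty).insert p.1 q.2) else r) r) base
  result.items.map (fun p => (p.1, p.2.items))

-- ===== PRECONDITION & SPEC =====
-- Pre_ excludes association lists with duplicate outer keys or duplicate hhmm keys inside one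
-- entry: those do not encode any Python dict (both arguments of the Python are dicts, whose keys
-- are unique), so first-vs-last-match behaviour on them is accidental.
def Pre_item_join (item_dict : List (String × List (String × List (String × Int)))) (grad : String) : Prop :=
  (item_dict.map Prod.fst).Nodup ∧ ∀ p ∈ item_dict, (p.2.map Prod.fst).Nodup
instance (item_dict : List (String × List (String × List (String × Int)))) (grad : String) : Decidable (Pre_item_join item_dict grad) := by unfold Pre_item_join; infer_instance

def pvWitness_item_join : (List (String × List (String × List (String × Int)))) × String :=
  ([("hr", [("0000", [("v", 60)])]), ("steps", [])], "15m")

def Spec_item_join (item_dict : List (String × List (String × List (String × Int)))) (grad : String) (out : List (String × List (String × List (String × Int)))) : Prop := out = item_join_alt item_dict grad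
instance (item_dict : List (String × List (String × List (String × Int)))) (grad : String) (out : List (String × List (String × List (String × Int)))) : Decidable (Spec_item_join item_dict grad out) := by unfold Spec_item_join; infer_instance

-- ===== CLAIM (what is proved, stated in full; the proofs are below) =====
def Claim_equal_item_join : Prop := ∀ (item_dict : List (String × List (String × List (String × Int)))) (grad : String), Dom_item_join item_dict grad → Pre_item_join item_dict grad → Spec_item_join item_dict grad (item_join item_dict grad)

-- ===== LEMMAS AND PROOFS =====

def pvScatter (ps : List (String × List (String × List (String × Int)))) (r : PySem.Dict String (PySem.Dict String (List (String × Int)))) : PySem.Dict String (PySem.Dict String (List (String × Int))) :=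
  ps.foldl (fun r p =>
    p.2.foldl (fun r q =>
      if r.contains q.1 then r.insert q.1 ((r.getD q.1 PySem.Dict.empty).insert p.1 q.2) else r) r) r

def pvCellFold (ps : List (String × List (String × List (String × Int)))) (h : String) (c : PySem.Dict String (List (String × Int))) : PySem.Dict String (List (String × Int)) :=
  ps.foldl (fun c p => p.2.foldl (fun c q => if q.1 == h then c.insert p.1 q.2 else c) c) c


def pvTmpA (item_dict : List (String × List (String × List (String × Int)))) (hhmm : String) : PySem.Dict String (List (String × Int)) :=
  (PySem.Dict.mk item_dict).keys.foldl (fun tmp key =>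
    let sub : PySem.Dict String (List (String × Int)) := PySem.Dict.mk ((PySem.Dict.mk item_dict).getD key [])
    if sub.contains hhmm then tmp.insert key (sub.getD hhmm []) else tmp.insert key []) PySem.Dict.empty

def pvBase0 (item_dict : List (String × List (String × List (String × Int)))) : PySem.Dict String (List (String × Int)) :=
  (PySem.Dict.mk item_dict).keys.foldl (fun t key => t.insert key ([] : List (String × Int))) PySem.Dict.empty

lemma pv_keys_mk (item_dict : List (String × List (String × List (String × Int)))) :
    (PySem.Dict.mk item_dict).keys = item_dict.map Prod.fst := by
  simp [PySem.Dict.keys]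

lemma pv_getD_mk (item_dict : List (String × List (String × List (String × Int))))
    (hnd : (item_dict.map Prod.fst).Nodup) {p : String × List (String × List (String × Int))} (hp : p ∈ item_dict) :
    (PySem.Dict.mk item_dict).getD p.1 [] = p.2 := by
  apply PySem.Dict.getD_of_mem_items
  · show (p.1, p.2) ∈ item_dict
    simpa using hp
  · rw [pv_keys_mk]; exact hnd

lemma pv_base0_eq (item_dict : List (String × List (String × List (String × Int))))
    (hnd : (item_dict.map Prod.fst).Nodup) :
    pvBase0 item_dict = PySem.Dict.mk (item_dict.map (fun p => (p.1, ([] : List (String × Int))))) := by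
  unfold pvBase0
  apply PySem.Dict.ext
  rw [PySem.Dict.items_foldl_insert_fresh ((PySem.Dict.mk item_dict).keys) (fun a => a) (fun _ => ([] : List (String × Int))) PySem.Dict.empty
      (fun a _ => PySem.Dict.contains_empty a) (by rw [show List.map (fun a => a) (PySem.Dict.mk item_dict).keys = (PySem.Dict.mk item_dict).keys from List.map_id _, pv_keys_mk]; exact hnd)]
  rw [pv_keys_mk]
  simp [List.map_map, Function.comp, PySem.Dict.empty]

lemma pv_tmpA_eq (item_dict : List (String × List (String × List (String × Int)))) (h : String)
    (hnd : (item_dict.map Prod.fst).Nodup) :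
    pvTmpA item_dict h
      = PySem.Dict.mk (item_dict.map (fun p => (p.1, if (PySem.Dict.mk p.2).contains h then (PySem.Dict.mk p.2).getD h [] else []))) := by
  unfold pvTmpA
  have hcollapse : ∀ (tmp : PySem.Dict String (List (String × Int))), ∀ key ∈ (PySem.Dict.mk item_dict).keys,
      (let sub : PySem.Dict String (List (String × Int)) := PySem.Dict.mk ((PySem.Dict.mk item_dict).getD key [])
       if sub.contains h then tmp.insert key (sub.getD h []) else tmp.insert key [])
      = tmp.insert key (if (PySem.Dict.mk ((PySem.Dict.mk item_dict).getD key [])).contains h then (PySem.Dict.mk ((PySem.Dict.mk item_dict).getD key [])).getD h [] else []) := by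
    intro tmp key _
    by_cases hc : (PySem.Dict.mk ((PySem.Dict.mk item_dict).getD key [])).contains h = true <;> simp [hc]
  rw [PySem.List.foldl_congr_mem _ _ _ _ hcollapse]
  apply PySem.Dict.ext
  rw [PySem.Dict.items_foldl_insert_fresh ((PySem.Dict.mk item_dict).keys) (fun a => a) (fun key => (if (PySem.Dict.mk ((PySem.Dict.mk item_dict).getD key [])).contains h then (PySem.Dict.mk ((PySem.Dict.mk item_dict).getD key [])).getD h [] else [])) PySem.Dict.empty
      (fun a _ => PySem.Dict.contains_empty a) (by rw [show List.map (fun a => a) (PySem.Dict.mk item_dict).keys = (PySem.Dict.mk item_dict).keys from List.map_id _, pv_keys_mk]; exact hnd)]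
  rw [pv_keys_mk]
  have : ∀ q ∈ item_dict.map Prod.fst, True := fun _ _ => trivial
  rw [List.map_map]
  show PySem.Dict.empty.items ++ item_dict.map _ = _
  rw [show (PySem.Dict.empty : PySem.Dict String (List (String × Int))).items = [] from rfl, List.nil_append]
  apply List.map_congr_left
  intro p hp
  simp only [Function.comp]
  rw [pv_getD_mk item_dict hnd hp]

lemma pv_get?_foldl_insert_const {ν : Type} (c : String → ν) (l : List String) (d : PySem.Dict String ν) (h : String) :
    (l.foldl (fun d x => d.insert x (c x)) d).get? h = if h ∈ l then some (c h) else d.get? h := by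
  induction l generalizing d with
  | nil => simp
  | cons x l ih =>
    simp only [List.foldl_cons, ih, List.mem_cons]
    by_cases hl : h ∈ l
    · simp [hl]
    · by_cases hx : h = x
      · simp [hx]
      · simp [hl, hx, PySem.Dict.get?_insert]

lemma pv_keys_scatter_inner (k : String) (qs : List (String × List (String × Int))) (r : PySem.Dict String (PySem.Dict String (List (String × Int)))) :
    (qs.foldl (fun r q => if r.contains q.1 then r.insert q.1 ((r.getD q.1 PySem.Dict.empty).insert k q.2) else r) r).keys = r.keys := by
  induction qs generalizing r with
  | nil => rfl
  | cons q qs ih =>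
    simp only [List.foldl_cons]
    rw [ih]
    by_cases hc : r.contains q.1 = true
    · rw [if_pos hc, PySem.Dict.keys_insert_of_contains _ _ hc]
    · rw [if_neg hc]

lemma pv_keys_scatter (ps : List (String × List (String × List (String × Int)))) (r : PySem.Dict String (PySem.Dict String (List (String × Int)))) :
    (pvScatter ps r).keys = r.keys := by
  induction ps generalizing r with
  | nil => rfl
  | cons p ps ih =>
    unfold pvScatter at ih ⊢
    simp only [List.foldl_cons]
    rw [ih, pv_keys_scatter_inner]

lemma pv_get?_scatter_inner (k : String) (qs : List (String × List (String × Int))) (r : PySem.Dict String (PySem.Dict String (List (String × Int)))) (h : String) :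
    (qs.foldl (fun r q => if r.contains q.1 then r.insert q.1 ((r.getD q.1 PySem.Dict.empty).insert k q.2) else r) r).get? h
      = (r.get? h).map (fun c => qs.foldl (fun c q => if q.1 == h then c.insert k q.2 else c) c) := by
  induction qs generalizing r with
  | nil => simp
  | cons q qs ih =>
    simp only [List.foldl_cons]
    rw [ih]
    have hstep : (if r.contains q.1 = true then r.insert q.1 ((r.getD q.1 PySem.Dict.empty).insert k q.2) else r).get? h
        = (r.get? h).map (fun c => if q.1 == h then c.insert k q.2 else c) := by
      by_cases hc : r.contains q.1 = true
      · rw [if_pos hc]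
        by_cases hh : h = q.1
        · obtain ⟨c0, hc0⟩ : ∃ c0, r.get? q.1 = some c0 := by
            have hs := PySem.Dict.contains_eq_isSome_get? r q.1
            rw [hc] at hs
            exact Option.isSome_iff_exists.mp hs.symm
          rw [hh, PySem.Dict.get?_insert_self, hc0, PySem.Dict.getD_eq_get?_getD, hc0]
          simp
        · rw [PySem.Dict.get?_insert_of_ne _ _ hh]
          have hb : (q.1 == h) = false := by simpa using fun e => hh e.symm
          cases r.get? h <;> simp [hb]
      · rw [if_neg hc]
        by_cases hb : (q.1 == h) = true
        · have hnone : r.get? h = none := by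
            have hs := PySem.Dict.contains_eq_isSome_get? r h
            have : h = q.1 := (by simpa using hb : q.1 = h).symm
            rw [← this] at hc
            cases ho : r.get? h <;> simp [ho] at hs ⊢
            · rw [hs] at hc; simp at hc
          simp [hnone]
        · cases r.get? h <;> simp [hb]
    rw [hstep, Option.map_map]
    rfl

lemma pv_get?_scatter (ps : List (String × List (String × List (String × Int)))) (r : PySem.Dict String (PySem.Dict String (List (String × Int)))) (h : String) :
    (pvScatter ps r).get? h = (r.get? h).map (pvCellFold ps h) := by
  induction ps generalizing r with
  | nil => unfold pvScatter pvCellFold; simp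
  | cons p ps ih =>
    unfold pvScatter at ih ⊢
    simp only [List.foldl_cons]
    rw [ih, pv_get?_scatter_inner, Option.map_map]
    rfl

lemma pv_foldl_no_match (k h : String) (qs : List (String × List (String × Int))) (c : PySem.Dict String (List (String × Int)))
    (hq : ∀ q ∈ qs, (q.1 == h) = false) :
    qs.foldl (fun c q => if q.1 == h then c.insert k q.2 else c) c = c := by
  induction qs generalizing c with
  | nil => rfl
  | cons q qs ih =>
    simp only [List.foldl_cons]
    rw [if_neg (by simp [hq q (by simp)])]
    exact ih c fun q' h' => hq q' (List.mem_cons_of_mem _ h')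

lemma pv_cell_inner_reduce (k h : String) (qs : List (String × List (String × Int))) (c : PySem.Dict String (List (String × Int)))
    (hnd : (qs.map Prod.fst).Nodup) :
    qs.foldl (fun c q => if q.1 == h then c.insert k q.2 else c) c
      = if (PySem.Dict.mk qs).contains h then c.insert k ((PySem.Dict.mk qs).getD h []) else c := by
  induction qs generalizing c with
  | nil => simp [PySem.Dict.contains_mk]
  | cons q qs ih =>
    simp only [List.map_cons, List.nodup_cons] at hnd
    simp only [List.foldl_cons]
    by_cases hq : (q.1 == h) = true
    · have hq' : q.1 = h := by simpa using hq
      rw [if_pos hq]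
      rw [pv_foldl_no_match k h qs _ (fun q' h' => by
        have hm : q'.1 ∈ qs.map Prod.fst := List.mem_map_of_mem h'
        have : q'.1 ≠ h := by
          intro e
          exact hnd.1 (by rw [hq', ← e]; exact hm)
        simpa using this)]
      have hcon : (PySem.Dict.mk (q :: qs)).contains h = true := by
        simp [PySem.Dict.contains_mk, hq]
      rw [if_pos hcon]
      congr 1
      rw [PySem.Dict.getD_eq_get?_getD, PySem.Dict.get?_mk_cons, if_pos hq]
      rfl
    · rw [if_neg hq, ih c hnd.2]
      have h1 : (PySem.Dict.mk (q :: qs)).contains h = (PySem.Dict.mk qs).contains h := by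
        simp [PySem.Dict.contains_mk, hq]
      have h2 : (PySem.Dict.mk (q :: qs)).getD h [] = (PySem.Dict.mk qs).getD h [] := by
        rw [PySem.Dict.getD_eq_get?_getD, PySem.Dict.get?_mk_cons, if_neg (by simp_all), ← PySem.Dict.getD_eq_get?_getD]
      rw [h1, h2]

lemma pv_cell_fold_items (h : String) (ps : List (String × List (String × List (String × Int)))) (pre : List (String × List (String × Int)))
    (hnd : (pre.map Prod.fst ++ ps.map Prod.fst).Nodup) :
    ps.foldl (fun c p => if (PySem.Dict.mk p.2).contains h then c.insert p.1 ((PySem.Dict.mk p.2).getD h []) else c)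
        (PySem.Dict.mk (pre ++ ps.map (fun p => (p.1, ([] : List (String × Int))))))
      = PySem.Dict.mk (pre ++ ps.map (fun p => (p.1, if (PySem.Dict.mk p.2).contains h then (PySem.Dict.mk p.2).getD h [] else []))) := by
  induction ps generalizing pre with
  | nil => simp
  | cons p ps ih =>
    simp only [List.map_cons, List.foldl_cons]
    have hnd' : ((pre ++ [(p.1, if (PySem.Dict.mk p.2).contains h then (PySem.Dict.mk p.2).getD h [] else [])]).map Prod.fst ++ ps.map Prod.fst).Nodup := by
      simp only [List.map_append, List.map_cons, List.map_nil] at hnd ⊢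
      simpa [List.append_assoc] using hnd
    have hp_pre : p.1 ∉ pre.map Prod.fst := by
      simp only [List.map_cons] at hnd
      intro hm
      exact (List.disjoint_of_nodup_append hnd) hm (by simp)
    have hp_ps : p.1 ∉ ps.map Prod.fst := by
      simp only [List.map_cons] at hnd
      have := (List.Nodup.of_append_right hnd)
      exact (List.nodup_cons.mp this).1
    by_cases hc : (PySem.Dict.mk p.2).contains h = true
    · rw [if_pos hc]
      set w : List (String × Int) := (PySem.Dict.mk p.2).getD h [] with hw
      have hcontains : (PySem.Dict.mk (pre ++ (p.1, ([] : List (String × Int))) :: ps.map (fun p => (p.1, ([] : List (String × Int)))))).contains p.1 = true := by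
        simp [PySem.Dict.contains_mk]
      have hins : (PySem.Dict.mk (pre ++ (p.1, ([] : List (String × Int))) :: ps.map (fun p => (p.1, ([] : List (String × Int)))))).insert p.1 w
          = PySem.Dict.mk ((pre ++ [(p.1, w)]) ++ ps.map (fun p => (p.1, ([] : List (String × Int))))) := by
        apply PySem.Dict.ext
        rw [PySem.Dict.items_insert_of_contains _ _ hcontains]
        show (pre ++ (p.1, ([] : List (String × Int))) :: ps.map (fun p => (p.1, ([] : List (String × Int))))).map
            (fun x => if (x.1 == p.1) = true then (p.1, w) else x) = _
        have e1 : pre.map (fun x => if (x.1 == p.1) = true then (p.1, w) else x) = pre := by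
          conv_rhs => rw [← List.map_id pre]
          apply List.map_congr_left
          intro x hx
          have : (x.1 == p.1) = false := by
            simp only [beq_eq_false_iff_ne, ne_eq]
            intro e
            exact hp_pre (e ▸ List.mem_map_of_mem hx)
          simp [this]
        have e3 : (ps.map (fun p => (p.1, ([] : List (String × Int))))).map (fun x => if (x.1 == p.1) = true then (p.1, w) else x) = ps.map (fun p => (p.1, ([] : List (String × Int)))) := by
          rw [List.map_map]
          apply List.map_congr_left
          intro a ha
          have : ((a.1 : String) == p.1) = false := by
            simp only [beq_eq_false_iff_ne, ne_eq]
            intro e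
            exact hp_ps (e ▸ List.mem_map_of_mem ha)
          simp [Function.comp, this]
        rw [List.map_append, List.map_cons, e1, e3]
        simp
      rw [hins]
      have hih := ih (pre ++ [(p.1, w)]) (by rw [if_pos hc] at hnd'; exact hnd')
      rw [hih, if_pos hc]
      simp [List.append_assoc]
    · rw [if_neg hc]
      have hih := ih (pre ++ [(p.1, ([] : List (String × Int)))]) (by rw [if_neg hc] at hnd'; exact hnd')
      rw [show pre ++ (p.1, ([] : List (String × Int))) :: ps.map (fun p => (p.1, ([] : List (String × Int)))) = (pre ++ [(p.1, ([] : List (String × Int)))]) ++ ps.map (fun p => (p.1, ([] : List (String × Int)))) by simp]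
      rw [hih, if_neg hc]
      simp [List.append_assoc]

lemma pv_cellFold_base0 (item_dict : List (String × List (String × List (String × Int)))) (h : String)
    (hnd : (item_dict.map Prod.fst).Nodup) (hnd2 : ∀ p ∈ item_dict, (p.2.map Prod.fst).Nodup) :
    pvCellFold item_dict h (pvBase0 item_dict) = pvTmpA item_dict h := by
  unfold pvCellFold
  rw [pv_base0_eq _ hnd]
  rw [PySem.List.foldl_congr_mem item_dict _
      (fun c p => if (PySem.Dict.mk p.2).contains h then c.insert p.1 ((PySem.Dict.mk p.2).getD h []) else c) _
      (fun c p hp => pv_cell_inner_reduce p.1 h p.2 c (hnd2 p hp))]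
  rw [show (PySem.Dict.mk (item_dict.map (fun p => (p.1, ([] : List (String × Int)))))) = PySem.Dict.mk ([] ++ item_dict.map (fun p => (p.1, ([] : List (String × Int))))) by rw [List.nil_append]]
  rw [pv_cell_fold_items h item_dict [] (by simpa using hnd)]
  rw [pv_tmpA_eq item_dict h hnd]
  simp

lemma pv_dict_eq_of (d d' : PySem.Dict String (PySem.Dict String (List (String × Int))))
    (hk : d.keys = d'.keys) (hnd : d.keys.Nodup) (hg : ∀ k, d.get? k = d'.get? k) : d = d' := by
  apply PySem.Dict.ext
  rw [PySem.Dict.items_eq_map_keys d hnd PySem.Dict.empty,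
      PySem.Dict.items_eq_map_keys d' (hk ▸ hnd) PySem.Dict.empty, ← hk]
  apply List.map_congr_left
  intro k _
  rw [PySem.Dict.getD_eq_get?_getD, PySem.Dict.getD_eq_get?_getD, hg k]

-- ===== VERDICT (by name: the statement is the Claim_ definition above) =====
theorem item_join_spec : Claim_equal_item_join := by
  intro item_dict grad _hdom hpre
  obtain ⟨hnd, hnd2⟩ := hpre
  show item_join item_dict grad = item_join_alt item_dict grad
  have hA : item_join item_dict grad
      = ((hhmm_list grad).foldl (fun r hhmm => r.insert hhmm (pvTmpA item_dict hhmm)) PySem.Dict.empty).items.map (fun p => (p.1, p.2.items)) := rfl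
  have hB : item_join_alt item_dict grad
      = (pvScatter item_dict ((hhmm_list grad).foldl (fun r hhmm => r.insert hhmm (pvBase0 item_dict)) PySem.Dict.empty)).items.map (fun p => (p.1, p.2.items)) := rfl
  rw [hA, hB]
  have hmain : ((hhmm_list grad).foldl (fun r hhmm => r.insert hhmm (pvTmpA item_dict hhmm)) PySem.Dict.empty)
      = pvScatter item_dict ((hhmm_list grad).foldl (fun r hhmm => r.insert hhmm (pvBase0 item_dict)) PySem.Dict.empty) := by
    apply pv_dict_eq_of
    · rw [pv_keys_scatter,
          PySem.Dict.keys_foldl_insert (hhmm_list grad) (fun _ hhmm => pvTmpA item_dict hhmm) PySem.Dict.empty,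
          PySem.Dict.keys_foldl_insert (hhmm_list grad) (fun _ _ => pvBase0 item_dict) PySem.Dict.empty]
    · exact PySem.Dict.nodup_keys_foldl_insert (hhmm_list grad) (fun _ hhmm => pvTmpA item_dict hhmm) _ PySem.Dict.nodup_keys_empty
    · intro k
      rw [pv_get?_scatter,
          pv_get?_foldl_insert_const (fun hhmm => pvTmpA item_dict hhmm) (hhmm_list grad) PySem.Dict.empty k,
          pv_get?_foldl_insert_const (fun _ => pvBase0 item_dict) (hhmm_list grad) PySem.Dict.empty k]
      by_cases hk : k ∈ hhmm_list grad
      · simp only [hk, if_pos, Option.map_some]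
        rw [pv_cellFold_base0 item_dict k hnd hnd2]
      · simp [hk, PySem.Dict.get?_empty]
  rw [hmain]
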